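-- pv_equiv track=rewrite | github.com/ZZy979/LeetCode | Algorithms/861/matrixScore.py | row_score
-- ===== SOURCE A (Python) =====
-- def row_score(row):
--     score = 0
--     p = 1
--     for c in range(len(row) - 1, -1, -1):
--         if row[c] == 1:
--             score += p
--         p <<= 1
--     return score
-- ===== SOURCE B (Python) =====
-- def row_score(row):
--     score = 0
--     for c in row:
--         score = score * 2 + (1 if c == 1 else 0)
--     return score
-- ===== Notes on version B (the rewrite author's own statement) =====
-- stated objective: faster
-- what changed: Horner's method iterating the row itself left-to-right (score = score*2 + bit), replacing A's reversed index range with a separately maintained power-of-two accumulator p <<= 1.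
import Mathlib
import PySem

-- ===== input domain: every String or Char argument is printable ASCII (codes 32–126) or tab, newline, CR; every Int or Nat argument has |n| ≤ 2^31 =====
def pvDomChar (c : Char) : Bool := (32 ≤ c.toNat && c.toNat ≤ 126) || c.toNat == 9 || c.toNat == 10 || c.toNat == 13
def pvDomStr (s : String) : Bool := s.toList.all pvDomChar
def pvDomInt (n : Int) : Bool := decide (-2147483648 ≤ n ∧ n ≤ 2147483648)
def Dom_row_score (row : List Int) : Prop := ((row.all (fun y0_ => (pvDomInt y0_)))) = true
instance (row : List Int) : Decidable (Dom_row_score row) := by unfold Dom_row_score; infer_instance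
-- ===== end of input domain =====

-- B replaces A's reversed index loop with power accumulator by Horner's method over the row itself (objective: simpler).

-- ===== PORT A =====
-- 'row[c]' is exact here: every index produced by the range lies in [0, len row).
def row_score (row : List Int) : Int :=
  ((PySem.List.pyRange ((row.length : Int) - 1) (-1) (-1)).foldl
    (fun (sp : Int × Int) c =>
      ((if PySem.List.pyGetD row c 0 = 1 then sp.1 + sp.2 else sp.1), sp.2 * 2))
    (0, 1)).1

-- ===== PORT B =====
def row_score_alt (row : List Int) : Int :=
  row.foldl (fun score c => score * 2 + (if c = 1 then 1 else 0)) 0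

-- ===== PRECONDITION & SPEC =====
def Spec_row_score (row : List Int) (out : Int) : Prop := out = row_score_alt row
instance (row : List Int) (out : Int) : Decidable (Spec_row_score row out) := by unfold Spec_row_score; infer_instance

-- ===== CLAIM (what is proved, stated in full; the proofs are below) =====
def Claim_equal_row_score : Prop := ∀ (row : List Int), Dom_row_score row → Spec_row_score row (row_score row)

-- ===== LEMMAS AND PROOFS =====

-- Linearity of A's loop in its initial state (score, p).
theorem foldA_lin (row : List Int) (idxs : List Int) :
    ∀ s p : Int,
    ((idxs.foldl
      (fun (sp : Int × Int) c =>
        ((if PySem.List.pyGetD row c 0 = 1 then sp.1 + sp.2 else sp.1), sp.2 * 2))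
      (s, p)).1)
    = s + p * ((idxs.foldl
      (fun (sp : Int × Int) c =>
        ((if PySem.List.pyGetD row c 0 = 1 then sp.1 + sp.2 else sp.1), sp.2 * 2))
      (0, 1)).1) := by
  induction idxs with
  | nil => intro s p; simp
  | cons c t ih =>
    intro s p
    simp only [List.foldl_cons]
    split_ifs with h
    · rw [ih (s + p) (p * 2), ih (0 + 1) (1 * 2)]; ring
    · rw [ih s (p * 2), ih 0 (1 * 2)]; ring

theorem rowA_append (row : List Int) (x : Int) :
    row_score (row ++ [x]) = (if x = 1 then 1 else 0) + 2 * row_score row := by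
  unfold row_score
  have hlen : ((row ++ [x]).length : Int) - 1 = (row.length : Int) := by
    simp
  rw [hlen, PySem.List.pyRange_neg_one_cons (by omega : (-1 : Int) < (row.length : Int))]
  simp only [List.foldl_cons]
  have hx : PySem.List.pyGetD (row ++ [x]) ((row.length : Int)) 0 = x := by
    rw [PySem.List.pyGetD_eq_getElem _ 0 (by omega) (by simp)]
    simp
  rw [hx]
  have hcongr :
      (PySem.List.pyRange ((row.length : Int) - 1) (-1) (-1)).foldl
        (fun (sp : Int × Int) c =>
          ((if PySem.List.pyGetD (row ++ [x]) c 0 = 1 then sp.1 + sp.2 else sp.1), sp.2 * 2))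
        ((if x = 1 then 0 + 1 else 0), 1 * 2)
      = (PySem.List.pyRange ((row.length : Int) - 1) (-1) (-1)).foldl
        (fun (sp : Int × Int) c =>
          ((if PySem.List.pyGetD row c 0 = 1 then sp.1 + sp.2 else sp.1), sp.2 * 2))
        ((if x = 1 then 0 + 1 else 0), 1 * 2) := by
    apply PySem.List.foldl_congr_mem
    intro acc c hc
    rw [PySem.List.mem_pyRange_neg_one] at hc
    have h0 : (0 : Int) ≤ c := by omega
    have h1 : c < ((row ++ [x]).length : Int) := by simp; omega
    have h1' : c < (row.length : Int) := by omega
    rw [PySem.List.pyGetD_eq_getElem _ 0 h0 h1, PySem.List.pyGetD_eq_getElem _ 0 h0 h1']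
    rw [List.getElem_append_left (by omega)]
  rw [hcongr, foldA_lin]
  split_ifs with h <;> ring

theorem rowB_append (row : List Int) (x : Int) :
    row_score_alt (row ++ [x]) = 2 * row_score_alt row + (if x = 1 then 1 else 0) := by
  unfold row_score_alt
  rw [List.foldl_append]
  simp only [List.foldl_cons, List.foldl_nil]
  ring

-- ===== VERDICT (by name: the statement is the Claim_ definition above) =====
theorem row_eq_alt (row : List Int) : row_score row = row_score_alt row := by
  induction row using List.reverseRecOn with
  | nil => decide
  | append_singleton t x ih =>
    rw [rowA_append, rowB_append, ih]
    ring

theorem row_score_spec : Claim_equal_row_score := by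
  intro row _
  exact row_eq_alt row
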